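-- pv_equiv track=rewrite | github.com/huangchink/chink_portfolio | 16bank.py | make_test_image
-- ===== SOURCE A (Python) =====
-- def make_test_image(H, W):
--     """做一張容易檢查的灰階 ramp 影像(0..255 循環)。回傳 HxW 的 list[list[int]]。"""
--     img = []
--     v = 0
--     for y in range(H):
--         row = []
--         for x in range(W):
--             row.append(v & 0xFF)
--             v += 1
--         img.append(row)
--     return img
-- ===== SOURCE B (Python) =====
-- def make_test_image(H, W):
--     """做一張容易檢查的灰階 ramp 影像(0..255 循環)。回傳 HxW 的 list[list[int]]。"""
--     flat = [i & 0xFF for i in range(max(H, 0) * max(W, 0))]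
--     return [flat[y * W:(y + 1) * W] for y in range(H)]
-- ===== Notes on version B (the rewrite author's own statement) =====
-- stated objective: alternative
-- what changed: Two staged passes instead of one stateful nested loop: first materialise the whole row-major ramp as one flat list of H*W byte values, then cut it into H rows of width W by slicing, eliminating the running counter threaded across cells.
import Mathlib
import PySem

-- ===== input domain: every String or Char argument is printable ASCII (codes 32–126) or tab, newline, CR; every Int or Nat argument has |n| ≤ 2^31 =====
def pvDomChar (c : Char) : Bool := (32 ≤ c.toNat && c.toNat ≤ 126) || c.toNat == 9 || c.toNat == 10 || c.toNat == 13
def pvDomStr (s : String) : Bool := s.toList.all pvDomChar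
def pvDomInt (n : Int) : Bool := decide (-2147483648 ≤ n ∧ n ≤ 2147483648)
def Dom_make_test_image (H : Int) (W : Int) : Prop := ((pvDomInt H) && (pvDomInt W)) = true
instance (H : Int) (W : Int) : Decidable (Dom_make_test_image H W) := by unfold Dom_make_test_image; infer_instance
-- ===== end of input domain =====

-- B builds the flat row-major ramp once and then cuts it into rows by slicing, instead of
-- threading a running counter through two nested loops (alternative decomposition; same cost).

-- ===== PORT A =====
-- literal port of A's two nested loops with the running counter v;
-- 'v & 0xFF' is ported as 'v % 256', exact since v starts at 0 and only increments (v ≥ 0).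
def make_test_image (H : Int) (W : Int) : List (List Int) :=
  let s := (PySem.List.pyRange 0 H 1).foldl
    (fun (st : List (List Int) × Int) (_y : Int) =>
      let t := (PySem.List.pyRange 0 W 1).foldl
        (fun (st2 : List Int × Int) (_x : Int) => (st2.1 ++ [st2.2 % 256], st2.2 + 1))
        (([] : List Int), st.2)
      (st.1 ++ [t.1], t.2))
    (([] : List (List Int)), (0 : Int))
  s.1

-- ===== PORT B =====
-- literal port of B's two stages: the flat ramp list, then one slice per row
-- ('i & 0xFF' ported as 'i % 256', exact since range indices are ≥ 0).
def make_test_image_alt (H : Int) (W : Int) : List (List Int) :=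
  let flat := (PySem.List.pyRange 0 (max H 0 * max W 0) 1).map (fun i => i % 256)
  (PySem.List.pyRange 0 H 1).map (fun y =>
    PySem.List.slice flat (some (y * W)) (some ((y + 1) * W)))

-- ===== PRECONDITION & SPEC =====
def Spec_make_test_image (H : Int) (W : Int) (out : List (List Int)) : Prop := out = make_test_image_alt H W
instance (H : Int) (W : Int) (out : List (List Int)) : Decidable (Spec_make_test_image H W out) := by unfold Spec_make_test_image; infer_instance

-- ===== CLAIM (what is proved, stated in full; the proofs are below) =====
def Claim_equal_make_test_image : Prop := ∀ (H : Int) (W : Int), Dom_make_test_image H W → Spec_make_test_image H W (make_test_image H W)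

-- ===== LEMMAS AND PROOFS =====

-- A's inner loop: appends v%256, (v+1)%256, … and ends with counter v + n
lemma pv_inner (n : Nat) (acc : List Int) (v : Int) :
    (List.range n).foldl (fun (st2 : List Int × Int) (_x : Nat) => (st2.1 ++ [st2.2 % 256], st2.2 + 1)) (acc, v)
      = (acc ++ (List.range n).map (fun (i : Nat) => (v + (i : Int)) % 256), v + n) := by
  induction n with
  | zero => simp
  | succ n ih =>
      rw [List.range_succ, List.foldl_append, ih]
      simp only [List.foldl_cons, List.foldl_nil, List.map_append, List.map_cons, List.map_nil,
        Prod.mk.injEq, List.append_assoc]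
      exact ⟨trivial, by push_cast; ring⟩

-- A's outer loop, with Wn = number of cells per row; ends with counter m * Wn
lemma pv_outer (Wn m : Nat) :
    (List.range m).foldl
      (fun (st : List (List Int) × Int) (_y : Nat) =>
        (st.1 ++ [((List.range Wn).foldl
            (fun (st2 : List Int × Int) (_x : Nat) => (st2.1 ++ [st2.2 % 256], st2.2 + 1))
            (([] : List Int), st.2)).1],
         ((List.range Wn).foldl
            (fun (st2 : List Int × Int) (_x : Nat) => (st2.1 ++ [st2.2 % 256], st2.2 + 1))
            (([] : List Int), st.2)).2))
      (([] : List (List Int)), (0 : Int))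
      = ((List.range m).map (fun (y : Nat) =>
           (List.range Wn).map (fun (i : Nat) => ((y : Int) * Wn + (i : Int)) % 256)),
         (m : Int) * Wn) := by
  induction m with
  | zero => simp
  | succ m ih =>
      rw [List.range_succ, List.foldl_append, ih]
      simp only [List.foldl_cons, List.foldl_nil, pv_inner, List.nil_append, List.map_append,
        List.map_cons, List.map_nil, Prod.mk.injEq]
      exact ⟨trivial, by push_cast; ring⟩

-- a window of the flat ramp list, in natural coordinates
lemma pv_flat_window (N j n : Nat) (h : j + n ≤ N) :
    ((((List.range N).map (fun (i : Nat) => (i : Int) % 256)).drop j).take n)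
      = (List.range n).map (fun (i : Nat) => ((j : Int) + (i : Int)) % 256) := by
  apply List.ext_getElem
  · simp; omega
  · intro k h1 h2
    simp only [List.getElem_take, List.getElem_drop, List.getElem_map, List.getElem_range]
    push_cast
    ring_nf

-- ===== VERDICT (by name: the statement is the Claim_ definition above) =====
theorem make_test_image_spec : Claim_equal_make_test_image := by
  intro H W _
  unfold Spec_make_test_image
  simp only [make_test_image, make_test_image_alt, PySem.List.pyRange_one, Int.sub_zero,
    List.foldl_map, List.map_map]
  rw [pv_outer]
  dsimp only
  refine List.map_congr_left ?_
  intro y hy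
  simp only [List.mem_range] at hy
  simp only [Function.comp_def, zero_add]
  have hH : 0 < H := by
    by_contra h
    have : H.toNat = 0 := Int.toNat_of_nonpos (le_of_not_gt h)
    omega
  by_cases hW : 0 < W
  · -- main case: W > 0
    have hWt : ((W.toNat : Int)) = W := Int.toNat_of_nonneg hW.le
    have hm : max H 0 * max W 0 = H * W := by
      rw [max_eq_left hH.le, max_eq_left hW.le]
    have hHW : (max H 0 * max W 0).toNat = H.toNat * W.toNat := by
      rw [hm, ← Int.toNat_of_nonneg hH.le, ← hWt, ← Nat.cast_mul, Int.toNat_natCast,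
        Int.toNat_natCast, Int.toNat_natCast]
    have e1 : (y : Int) * W = (((y * W.toNat : Nat)) : Int) := by
      push_cast; rw [hWt]
    have e2 : ((y : Int) + 1) * W = (((y * W.toNat + W.toNat : Nat)) : Int) := by
      push_cast; rw [hWt]; ring
    rw [e1, e2, PySem.List.slice_natCast]
    have e3 : y * W.toNat + W.toNat - y * W.toNat = W.toNat := by omega
    rw [e3, pv_flat_window (max H 0 * max W 0).toNat (y * W.toNat) W.toNat
        (by rw [hHW]; have hy1 : y + 1 <= H.toNat := hy; nlinarith)]
    refine (List.map_congr_left ?_).symm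
    intro i _
    push_cast
    rfl
  · -- W <= 0: every row is empty on both sides
    have hWt : W.toNat = 0 := Int.toNat_of_nonpos (le_of_not_gt hW)
    have hHW : (max H 0 * max W 0).toNat = 0 := by
      rw [max_eq_right (le_of_not_gt hW), mul_zero]
      rfl
    simp [hWt, hHW, PySem.List.slice]
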